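-- pv_equiv track=rewrite | github.com/SAKTHIPRIYASATHISH/ai-finance-advisor | utils/advisor.py | parse_tips
-- ===== SOURCE A (Python) =====
-- def parse_tips(text: str) -> list:
--     tips = []
--     lines = text.strip().split('\n')
--     current_title = None
--     current_advice = []
--
--     for line in lines:
--         line = line.strip()
--         if not line:
--             continue
--         if line.upper().startswith('TIP') and ':' in line:
--             if current_title and current_advice:
--                 tips.append({
--                     'title':  current_title,
--                     'advice': ' '.join(current_advice).strip()
--                 })
--                 current_advice = []
--             parts = line.split(':', 1)
--             current_title = parts[1].strip().strip('*').strip() if len(parts) > 1 else line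
--         elif current_title:
--             current_advice.append(line.strip('*').strip())
--
--     if current_title and current_advice:
--         tips.append({
--             'title':  current_title,
--             'advice': ' '.join(current_advice).strip()
--         })
--
--     if not tips:
--         tips = [{'title': 'AI Advice', 'advice': text}]
--
--     return tips[:3]
-- ===== SOURCE B (Python) =====
-- def parse_tips(text: str) -> list:
--     # Index-based: locate header positions, then slice the body of each tip
--     # out of the cleaned line list between consecutive headers.
--     lines = [l.strip() for l in text.strip().split('\n') if l.strip()]
--     idxs = [i for i, l in enumerate(lines)
--             if l.upper().startswith('TIP') and ':' in l]
--     tips = []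
--     for i, j in zip(idxs, idxs[1:] + [len(lines)]):
--         title = lines[i].split(':', 1)[1].strip().strip('*').strip()
--         if title and j - i > 1:
--             advice = ' '.join(l.strip('*').strip() for l in lines[i + 1:j]).strip()
--             tips.append({'title': title, 'advice': advice})
--     return tips[:3] if tips else [{'title': 'AI Advice', 'advice': text}]
-- ===== Notes on version B (the rewrite author's own statement) =====
-- stated objective: alternative
-- what changed: Replaces A's single stateful scan (current_title/current_advice with in-loop and post-loop flushes) by an index-based algorithm: compute the list of header-line positions, pair each with the next header position (or the end), and build each tip by slicing the body lines between consecutive headers.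
import Mathlib
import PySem

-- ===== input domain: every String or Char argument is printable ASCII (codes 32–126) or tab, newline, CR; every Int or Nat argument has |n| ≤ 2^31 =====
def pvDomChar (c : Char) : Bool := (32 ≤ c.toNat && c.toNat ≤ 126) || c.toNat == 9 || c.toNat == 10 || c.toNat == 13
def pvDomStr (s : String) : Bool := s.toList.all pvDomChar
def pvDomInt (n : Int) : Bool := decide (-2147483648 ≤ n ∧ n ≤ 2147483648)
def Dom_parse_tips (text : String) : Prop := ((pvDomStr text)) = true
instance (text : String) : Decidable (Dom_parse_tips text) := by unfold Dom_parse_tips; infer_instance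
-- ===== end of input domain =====

-- B replaces A's single stateful scan by an index-based algorithm (header positions,
-- then slicing the body between consecutive headers) — objective: alternative, same
-- cost; return values proved equal on all inputs.

-- Shared line-level helpers (identical Python expressions appear in both A and B):
-- line.upper().startswith('TIP') and ':' in line
def pvIsHeader (line : String) : Bool :=
  PySem.Str.startswith (PySem.Str.upper line) "TIP" && PySem.Str.isIn ":" line
-- line.strip('*').strip()
def pvCleanLine (line : String) : String :=
  PySem.Str.strip (PySem.Str.stripChars line "*")
-- line.split(':', 1)  (sep ":" ≠ "" so splitMax? is always some; getD never fires)
def pvParts (line : String) : List String :=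
  (PySem.Str.splitMax? line ":" 1).getD []
-- parts[1] — only evaluated under a ':' ∈ line guard in Python, where len(parts) = 2
def pvPart1 (line : String) : String :=
  (PySem.List.pyGet? (pvParts line) 1).getD ""
-- parts[1].strip().strip('*').strip()
def pvTitleExpr (line : String) : String :=
  PySem.Str.strip (PySem.Str.stripChars (PySem.Str.strip (pvPart1 line)) "*")
-- {'title': t, 'advice': ' '.join(adv).strip()}
def pvRenderTip (t : String) (adv : List String) : List (String × String) :=
  [("title", t), ("advice", PySem.Str.strip (PySem.Str.join " " adv))]
-- Python truthiness of current_title (None or str)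
def pvTruthy : Option String → Bool
  | none => false
  | some t => !(t == "")

-- ===== PORT A =====
-- loop body on the already-stripped, non-empty line
def pvACore (st : List (List (String × String)) × Option String × List String) (line : String) :
    List (List (String × String)) × Option String × List String :=
  let (tips, curTitle, curAdvice) := st
  if pvIsHeader line then
    let (tips, curAdvice) :=
      if pvTruthy curTitle && !curAdvice.isEmpty then
        (tips ++ [pvRenderTip (curTitle.getD "") curAdvice], ([] : List String))
      else (tips, curAdvice)
    let parts := pvParts line
    let newTitle := if parts.length > 1 then pvTitleExpr line else line
    (tips, some newTitle, curAdvice)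
  else if pvTruthy curTitle then
    (tips, curTitle, curAdvice ++ [pvCleanLine line])
  else
    (tips, curTitle, curAdvice)

-- 'line = line.strip(); if not line: continue'
def pvAStep (st : List (List (String × String)) × Option String × List String) (line0 : String) :
    List (List (String × String)) × Option String × List String :=
  let line := PySem.Str.strip line0
  if line = "" then st else pvACore st line

-- final flush after the loop
def pvFlush (st : List (List (String × String)) × Option String × List String) :
    List (List (String × String)) :=
  if pvTruthy st.2.1 && !st.2.2.isEmpty then st.1 ++ [pvRenderTip (st.2.1.getD "") st.2.2]
  else st.1

def parse_tips (text : String) : List (List (String × String)) :=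
  -- text.strip().split('\n')  (sep "\n" ≠ "" so split? is always some)
  let lines := (PySem.Str.split? (PySem.Str.strip text) "\n").getD []
  let st := lines.foldl pvAStep ([], none, [])
  let tips := pvFlush st
  let tips := if tips.isEmpty then [[("title", "AI Advice"), ("advice", text)]] else tips
  PySem.List.slice tips none (some 3)

-- ===== PORT B =====
-- [l.strip() for l in … if l.strip()]
def pvBClean (l : String) : Option String :=
  let s := PySem.Str.strip l
  if s = "" then none else some s

-- loop body for one (i, j) pair of zip(idxs, idxs[1:] + [len(lines)]):
-- title = lines[i].split(':',1)[1]…; if title and j - i > 1: append the rendered tip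
-- (lines[i] is in range by construction — i comes from enumerate — so getD never fires)
def pvPair (lines : List String) (p : Int × Int) : List (List (String × String)) :=
  let title := pvTitleExpr ((PySem.List.pyGet? lines p.1).getD "")
  if title ≠ "" ∧ p.2 - p.1 > 1 then
    [pvRenderTip title ((PySem.List.slice lines (some (p.1 + 1)) (some p.2)).map pvCleanLine)]
  else []

def parse_tips_alt (text : String) : List (List (String × String)) :=
  let lines := ((PySem.Str.split? (PySem.Str.strip text) "\n").getD []).filterMap pvBClean
  -- [i for i, l in enumerate(lines) if l.upper().startswith('TIP') and ':' in l]
  let idxs := ((PySem.List.enumerate lines).filter (fun p => pvIsHeader p.2)).map Prod.fst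
  -- zip(idxs, idxs[1:] + [len(lines)])
  let pairs := idxs.zip (PySem.List.slice idxs (some 1) none ++ [(lines.length : Int)])
  let tips := pairs.foldl (fun acc p => acc ++ pvPair lines p) []
  if tips.isEmpty then [[("title", "AI Advice"), ("advice", text)]]
  else PySem.List.slice tips none (some 3)

-- ===== PRECONDITION & SPEC =====
def Spec_parse_tips (text : String) (out : List (List (String × String))) : Prop := out = parse_tips_alt text
instance (text : String) (out : List (List (String × String))) : Decidable (Spec_parse_tips text out) := by unfold Spec_parse_tips; infer_instance

-- ===== CLAIM (what is proved, stated in full; the proofs are below) =====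
def Claim_equal_parse_tips : Prop := ∀ (text : String), Dom_parse_tips text → Spec_parse_tips text (parse_tips text)

-- ===== LEMMAS AND PROOFS =====

-- On a header line (':' ∈ line), line.split(':', 1) has exactly two pieces.
theorem pv_go_len_zero (sep : List Char) (fuel : Nat) (l cur : List Char) (acc : List (List Char)) :
    (PySem.Chars.splitOnMax.go sep fuel 0 l cur acc).length = acc.length + 1 := by
  cases fuel with
  | zero => simp [PySem.Chars.splitOnMax.go]
  | succ fuel => cases l <;> simp [PySem.Chars.splitOnMax.go]

theorem pv_go_len_one (fuel : Nat) (l cur : List Char) (acc : List (List Char))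
    (hf : l.length < fuel) (hm : ':' ∈ l) :
    (PySem.Chars.splitOnMax.go [':'] fuel 1 l cur acc).length = acc.length + 2 := by
  induction fuel generalizing l cur acc with
  | zero => omega
  | succ fuel ih =>
    cases l with
    | nil => simp at hm
    | cons c rest =>
      by_cases hc : c = ':'
      · subst hc
        simp only [PySem.Chars.splitOnMax.go, List.isPrefixOf, BEq.rfl, Bool.true_and,
          if_true, if_neg (by omega : ¬ (1 : Nat) = 0)]
        simp [pv_go_len_zero]
      · have hm' : ':' ∈ rest := by
          rcases List.mem_cons.mp hm with h | h
          · exact absurd h.symm hc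
          · exact h
        have hpre : [':'].isPrefixOf (c :: rest) = false := by
          simp [List.isPrefixOf]
          exact fun h => absurd h.symm hc
        simp only [PySem.Chars.splitOnMax.go, hpre, if_neg (by omega : ¬ (1 : Nat) = 0),
          Bool.false_eq_true, if_false]
        exact ih rest (c :: cur) acc (by simpa using Nat.lt_of_succ_lt_succ hf) hm'

theorem pvParts_len (line : String) (h : PySem.Str.isIn ":" line = true) :
    (pvParts line).length = 2 := by
  have hmem : ':' ∈ line.toList := by
    have := (PySem.Str.isIn_iff_infix ":" line).mp h
    exact (List.singleton_infix_iff ':' line.toList).mp (by simpa using this)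
  have hlen := pv_go_len_one (line.toList.length + 1) line.toList [] [] (by omega) hmem
  unfold pvParts PySem.Str.splitMax? PySem.Chars.splitMax?
  simp only [PySem.Chars.splitOnMax, show ((1:Int) < 0) = False by simp, if_false]
  simpa [PySem.Chars.splitOnMax] using hlen

-- A's guarded title expression equals the unguarded one on header lines.
theorem pvHeader_title (line : String) (h : pvIsHeader line = true) :
    (if (pvParts line).length > 1 then pvTitleExpr line else line) = pvTitleExpr line := by
  have h2 : PySem.Str.isIn ":" line = true := by
    simp only [pvIsHeader, Bool.and_eq_true] at h
    exact h.2
  rw [pvParts_len line h2]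
  simp

-- Specification-side segmentation (the reference shape both programs compute)
def pvSeg : List String → Option (String × List String) → List (String × List String)
  | [], none => []
  | [], some g => [g]
  | l :: ls, cur =>
    if pvIsHeader l then
      (match cur with | none => [] | some g => [g]) ++ pvSeg ls (some (pvTitleExpr l, []))
    else
      match cur with
      | none => pvSeg ls none
      | some g => pvSeg ls (some (g.1, g.2 ++ [pvCleanLine l]))

-- render-and-filter of a group list
def pvRenderAll (groups : List (String × List String)) : List (List (String × String)) :=
  (groups.filter (fun g => !(g.1 == "") && !g.2.isEmpty)).map (fun g => pvRenderTip g.1 g.2)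

theorem pvRenderAll_append (gs hs : List (String × List String)) :
    pvRenderAll (gs ++ hs) = pvRenderAll gs ++ pvRenderAll hs := by
  simp [pvRenderAll]

-- A group whose title is the empty string is dropped, whatever advice it collected.
theorem pvSeg_empty_title (ls : List String) (a a' : List String) :
    pvRenderAll (pvSeg ls (some ("", a))) = pvRenderAll (pvSeg ls (some ("", a'))) := by
  induction ls generalizing a a' with
  | nil => simp [pvSeg, pvRenderAll]
  | cons l ls ih =>
    by_cases hh : pvIsHeader l = true
    · simp [pvSeg, hh, pvRenderAll]
    · simpa [pvSeg, hh] using ih (a ++ [pvCleanLine l]) (a' ++ [pvCleanLine l])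

-- A's loop over pre-cleaned lines, flushed at the end, renders exactly the segmentation.
theorem pvA_seg (ls : List String) (tips : List (List (String × String))) (t : String)
    (a : List String) (hta : t = "" → a = []) :
    pvFlush (List.foldl pvACore (tips, some t, a) ls) =
      tips ++ pvRenderAll (pvSeg ls (some (t, a))) := by
  induction ls generalizing tips t a with
  | nil =>
    by_cases h1 : t = ""
    · subst h1
      simp [pvFlush, pvTruthy, pvSeg, pvRenderAll, hta rfl]
    · by_cases h2 : a = []
      · subst h2; simp [pvFlush, pvTruthy, pvSeg, pvRenderAll]
      · simp [pvFlush, pvTruthy, pvSeg, pvRenderAll, h1, h2, pvRenderTip]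
  | cons l ls ih =>
    by_cases hh : pvIsHeader l = true
    · by_cases hc : t ≠ "" ∧ a ≠ []
      · have hstep : pvACore (tips, some t, a) l =
            (tips ++ [pvRenderTip t a], some (pvTitleExpr l), []) := by
          simp [pvACore, hh, pvTruthy, hc.1, hc.2, pvHeader_title l hh]
        rw [List.foldl_cons, hstep, ih _ _ _ (fun _ => rfl)]
        simp only [pvSeg, hh, if_true]
        rw [pvRenderAll_append]
        simp [pvRenderAll, hc.1, hc.2, List.append_assoc]
      · have ha : a = [] := by
          by_cases h1 : t = ""
          · exact hta h1
          · by_contra h2; exact hc ⟨h1, h2⟩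
        subst ha
        have hstep : pvACore (tips, some t, []) l =
            (tips, some (pvTitleExpr l), []) := by
          simp [pvACore, hh, pvTruthy, pvHeader_title l hh]
        rw [List.foldl_cons, hstep, ih _ _ _ (fun _ => rfl)]
        simp only [pvSeg, hh, if_true]
        rw [pvRenderAll_append]
        simp [pvRenderAll]
    · by_cases h1 : t = ""
      · subst h1
        have ha := hta rfl; subst ha
        have hstep : pvACore (tips, some "", []) l = (tips, some "", []) := by
          simp [pvACore, hh, pvTruthy]
        rw [List.foldl_cons, hstep, ih _ _ _ (fun _ => rfl)]
        simp only [pvSeg, hh, Bool.false_eq_true, if_false]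
        rw [pvSeg_empty_title ls [] ([] ++ [pvCleanLine l])]
      · have hstep : pvACore (tips, some t, a) l =
            (tips, some t, a ++ [pvCleanLine l]) := by
          simp [pvACore, hh, pvTruthy, h1]
        rw [List.foldl_cons, hstep, ih _ _ _ (fun h => absurd h h1)]
        simp [pvSeg, hh]

theorem pvA_seg_none (ls : List String) (tips : List (List (String × String))) :
    pvFlush (List.foldl pvACore (tips, none, []) ls) = tips ++ pvRenderAll (pvSeg ls none) := by
  induction ls generalizing tips with
  | nil => simp [pvFlush, pvTruthy, pvSeg, pvRenderAll]
  | cons l ls ih =>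
    by_cases hh : pvIsHeader l = true
    · have hstep : pvACore (tips, none, []) l = (tips, some (pvTitleExpr l), []) := by
        simp [pvACore, hh, pvTruthy, pvHeader_title l hh]
      rw [List.foldl_cons, hstep, pvA_seg ls tips (pvTitleExpr l) [] (fun _ => rfl)]
      simp [pvSeg, hh]
    · have hstep : pvACore (tips, none, []) l = (tips, none, []) := by
        simp [pvACore, hh, pvTruthy]
      rw [List.foldl_cons, hstep, ih]
      simp [pvSeg, hh]

-- A's strip-and-skip loop over raw lines is the clean-first loop over the filtered lines.
theorem pvA_filterMap (ls : List String)
    (st : List (List (String × String)) × Option String × List String) :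
    List.foldl pvAStep st ls = List.foldl pvACore st (ls.filterMap pvBClean) := by
  induction ls generalizing st with
  | nil => rfl
  | cons l ls ih =>
    by_cases h : PySem.Str.strip l = ""
    · have hc : pvBClean l = none := by simp [pvBClean, h]
      simp only [List.foldl_cons, List.filterMap_cons, hc]
      rw [show pvAStep st l = st from by simp [pvAStep, h], ih]
    · have hc : pvBClean l = some (PySem.Str.strip l) := by simp [pvBClean, h]
      simp only [List.foldl_cons, List.filterMap_cons, hc]
      rw [show pvAStep st l = pvACore st (PySem.Str.strip l) from by simp [pvAStep, h], ih]

-- ---------- B side ----------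

-- header-index list of a line list
def pvHIdx (L : List String) : List Int :=
  ((PySem.List.enumerate L).filter (fun p => pvIsHeader p.2)).map Prod.fst

theorem pvEnum_shift {α : Type} (L : List α) (s : Int) :
    PySem.List.enumerate L (s + 1) = (PySem.List.enumerate L s).map (fun p => (p.1 + 1, p.2)) := by
  induction L generalizing s with
  | nil => simp [PySem.List.enumerate_nil]
  | cons x L ih => simp [PySem.List.enumerate_cons, ih]

theorem pvHIdx_cons (x : String) (L : List String) :
    pvHIdx (x :: L) =
      (if pvIsHeader x then [(0 : Int)] else []) ++ (pvHIdx L).map (· + 1) := by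
  unfold pvHIdx
  rw [PySem.List.enumerate_cons, pvEnum_shift L 0]
  by_cases hh : pvIsHeader x = true <;>
    simp [hh, List.filter_map, List.map_map, Function.comp_def]

theorem pvHIdx_nonneg (L : List String) : ∀ i ∈ pvHIdx L, 0 ≤ i := by
  induction L with
  | nil => simp [pvHIdx]
  | cons x L ih =>
    intro i hi
    rw [pvHIdx_cons] at hi
    rcases List.mem_append.mp hi with h | h
    · by_cases hh : pvIsHeader x = true <;> simp [hh] at h; omega
    · rcases List.mem_map.mp h with ⟨j, hj, rfl⟩
      have := ih j hj; omega

theorem pvHIdx_nil_iff (L : List String) :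
    pvHIdx L = [] ↔ ∀ l ∈ L, pvIsHeader l = false := by
  induction L with
  | nil => simp [pvHIdx]
  | cons x L ih =>
    rw [pvHIdx_cons]
    by_cases hh : pvIsHeader x = true <;> simp [hh, ih]

-- first header index characterization
theorem pvHIdx_head (L : List String) (b : Int) (rest : List Int) (h : pvHIdx L = b :: rest) :
    ∃ k : Nat, b = (k : Int) ∧ k < L.length ∧
      L.take k = L.takeWhile (fun l => !pvIsHeader l) := by
  induction L generalizing b rest with
  | nil => simp [pvHIdx] at h
  | cons x L ih =>
    rw [pvHIdx_cons] at h
    by_cases hh : pvIsHeader x = true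
    · simp only [hh, if_true, List.singleton_append] at h
      refine ⟨0, by exact (List.cons_eq_cons.mp h).1.symm, by simp, ?_⟩
      · simp [hh]
    · simp only [hh, Bool.false_eq_true, if_false, List.nil_append] at h
      cases hL : pvHIdx L with
      | nil => rw [hL] at h; simp at h
      | cons b' rest' =>
        rw [hL] at h
        simp only [List.map_cons, List.cons.injEq] at h
        obtain ⟨k, hk, hklt, htake⟩ := ih b' rest' hL
        refine ⟨k + 1, by omega, by simp; omega, ?_⟩
        simp [hh, ← htake]

theorem pvSeg_none_noHdr (L : List String) (h : ∀ l ∈ L, pvIsHeader l = false) :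
    pvSeg L none = [] := by
  induction L with
  | nil => simp [pvSeg]
  | cons x L ih =>
    have hx := h x (by simp)
    simp only [pvSeg, hx, Bool.false_eq_true, if_false]
    exact ih (fun l hl => h l (by simp [hl]))

-- key decomposition: an open group takes the leading non-header lines, the rest is pvSeg … none
theorem pvSeg_split (L : List String) (g : String × List String) :
    pvRenderAll (pvSeg L (some g)) =
      pvRenderAll [(g.1, g.2 ++ (L.takeWhile (fun l => !pvIsHeader l)).map pvCleanLine)] ++
        pvRenderAll (pvSeg L none) := by
  induction L generalizing g with
  | nil => simp [pvSeg, pvRenderAll]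
  | cons x L ih =>
    by_cases hh : pvIsHeader x = true
    · simp only [pvSeg, hh, if_true, List.takeWhile_cons, Bool.not_true]
      rw [pvRenderAll_append]
      simp
    · simp only [pvSeg, hh, Bool.false_eq_true, if_false, List.takeWhile_cons]
      rw [ih (g.1, g.2 ++ [pvCleanLine x])]
      simp

-- per-pair shift: pvPair over a cons with both indices bumped
theorem pvPair_shift (x : String) (L : List String) (m n : Nat) :
    pvPair (x :: L) ((m : Int) + 1, (n : Int) + 1) = pvPair L ((m : Int), (n : Int)) := by
  unfold pvPair
  have h1 : ((m : Int) + 1) = ((m + 1 : Nat) : Int) := by push_cast; ring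
  have h2 : ((n : Int) + 1) = ((n + 1 : Nat) : Int) := by push_cast; ring
  simp only [h1, h2, PySem.List.pyGet?_natCast, List.getElem?_cons_succ]
  have h3 : (((m + 1 : Nat) : Int) + 1) = ((m + 2 : Nat) : Int) := by push_cast; ring
  rw [h3, PySem.List.slice_natCast, PySem.List.slice_natCast]
  have hd : List.drop (m + 2) (x :: L) = List.drop (m + 1) L := rfl
  have ht : n + 1 - (m + 2) = n - (m + 1) := by omega
  rw [hd, ht]
  have hc : (pvTitleExpr (L[m]?.getD "") ≠ "" ∧ ((n + 1 : Nat) : Int) - ((m + 1 : Nat) : Int) > 1)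
      ↔ (pvTitleExpr (L[m]?.getD "") ≠ "" ∧ ((n : Nat) : Int) - ((m : Nat) : Int) > 1) := by
    constructor <;> rintro ⟨a, b⟩ <;> exact ⟨a, by push_cast at b ⊢; omega⟩
  exact if_congr hc rfl rfl

-- fold-shift over a pair list of nonnegative indices
theorem pvFlat_shift (x : String) (L : List String) (ps : List (Int × Int))
    (h : ∀ p ∈ ps, 0 ≤ p.1 ∧ 0 ≤ p.2) :
    (ps.map (fun p => (p.1 + 1, p.2 + 1))).flatMap (pvPair (x :: L)) =
      ps.flatMap (pvPair L) := by
  induction ps with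
  | nil => simp
  | cons p ps ih =>
    obtain ⟨a, b⟩ := p
    obtain ⟨h1, h2⟩ := h (a, b) (by simp)
    obtain ⟨ma, rfl⟩ : ∃ ma : Nat, a = (ma : Int) := ⟨a.toNat, by omega⟩
    obtain ⟨mb, rfl⟩ : ∃ mb : Nat, b = (mb : Int) := ⟨b.toNat, by omega⟩
    simp only [List.map_cons, List.flatMap_cons]
    rw [ih (fun q hq => h q (by simp [hq])), pvPair_shift x L ma mb]

-- all indices appearing in the zipped pair list are nonnegative
theorem pvZip_nonneg (L : List String) :
    ∀ p ∈ (pvHIdx L).zip ((pvHIdx L).tail ++ [(L.length : Int)]), 0 ≤ p.1 ∧ 0 ≤ p.2 := by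
  intro p hp
  obtain ⟨h1, h2⟩ := List.of_mem_zip hp
  refine ⟨pvHIdx_nonneg L _ h1, ?_⟩
  rcases List.mem_append.mp h2 with h | h
  · exact pvHIdx_nonneg L _ (List.mem_of_mem_tail h)
  · simp at h; omega

-- the head pair of a header-opened block renders that block
theorem pvPair_head (x : String) (L : List String) (k : Nat) (hk : k ≤ L.length) :
    pvPair (x :: L) (0, (k : Int) + 1) =
      pvRenderAll [(pvTitleExpr x, (L.take k).map pvCleanLine)] := by
  unfold pvPair pvRenderAll
  have hget : (PySem.List.pyGet? (x :: L) (0 : Int)).getD "" = x := by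
    simp [PySem.List.pyGet?, PySem.List.pyIdx?]
  have hslice : PySem.List.slice (x :: L) (some ((0 : Int) + 1)) (some ((k : Int) + 1)) = L.take k := by
    rw [show ((0 : Int) + 1) = ((1 : Nat) : Int) by norm_num,
      show ((k : Int) + 1) = ((k + 1 : Nat) : Int) by push_cast; ring,
      PySem.List.slice_natCast]
    simp
  simp only [hget, hslice]
  by_cases ht : pvTitleExpr x = ""
  · simp [ht]
  · by_cases hk1 : 1 ≤ k
    · have hne : L.take k ≠ [] := by
        intro hcon
        have hlt := congrArg List.length hcon
        rw [List.length_take] at hlt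
        simp only [List.length_nil] at hlt
        omega
      have hc2 : ((k : Int) + 1 - 0 > 1) := by omega
      rw [if_pos ⟨ht, hc2⟩]
      have hne' : (L.take k).map pvCleanLine ≠ [] := by simpa using hne
      have hne'' : List.take k (List.map pvCleanLine L) ≠ [] := by
        rw [← List.map_take]; exact hne'
      simp [pvRenderTip, ht, hne'']
    · have hk0 : k = 0 := by omega
      subst hk0
      rw [if_neg (fun h => by have := h.2; norm_num at this)]
      simp

-- main B lemma: the index/slice pass renders the segmentation
theorem pvB_main (L : List String) :
    ((pvHIdx L).zip ((pvHIdx L).tail ++ [(L.length : Int)])).flatMap (pvPair L) =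
      pvRenderAll (pvSeg L none) := by
  induction L with
  | nil => simp [pvHIdx, pvSeg, pvRenderAll]
  | cons x L ih =>
    rw [pvHIdx_cons]
    have hlen2 : (((x :: L).length : Nat) : Int) = ((L.length : Nat) : Int) + 1 := by
      push_cast [List.length_cons]; ring
    by_cases hh : pvIsHeader x = true
    · simp only [hh, if_true, List.singleton_append, List.tail_cons]
      have hseg : pvSeg (x :: L) none = pvSeg L (some (pvTitleExpr x, [])) := by
        simp [pvSeg, hh]
      cases hL : pvHIdx L with
      | nil =>
        have hnoh := (pvHIdx_nil_iff L).mp hL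
        have htw : L.takeWhile (fun l => !pvIsHeader l) = L :=
          List.takeWhile_eq_self_iff.mpr (fun a ha => by simp [hnoh a ha])
        simp only [List.map_nil, List.nil_append]
        rw [hlen2]
        rw [show ([(0 : Int)].zip [((L.length : Nat) : Int) + 1]) =
            [((0 : Int), ((L.length : Nat) : Int) + 1)] by simp]
        rw [List.flatMap_cons, List.flatMap_nil, List.append_nil]
        rw [pvPair_head x L L.length le_rfl]
        rw [hseg, pvSeg_split L (pvTitleExpr x, []), pvSeg_none_noHdr L hnoh]
        simp [htw, pvRenderAll]
      | cons b rest =>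
        obtain ⟨k, rfl, hklt, htake⟩ := pvHIdx_head L b rest hL
        have hnn := pvZip_nonneg L
        rw [hL] at ih hnn
        simp only [List.tail_cons] at ih hnn
        simp only [List.map_cons]
        rw [hlen2]
        rw [show (((0 : Int) :: ((k : Int) + 1) :: rest.map (· + 1)).zip
              ((((k : Int) + 1) :: rest.map (· + 1)) ++ [((L.length : Nat) : Int) + 1])) =
            ((0 : Int), (k : Int) + 1) ::
              ((((k : Int) + 1) :: rest.map (· + 1)).zip
                (rest.map (· + 1) ++ [((L.length : Nat) : Int) + 1])) by simp]
        rw [List.flatMap_cons]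
        have hz : ((((k : Int) + 1) :: rest.map (· + 1)).zip
              (rest.map (· + 1) ++ [((L.length : Nat) : Int) + 1])) =
            ((((k : Int)) :: rest).zip (rest ++ [((L.length : Nat) : Int)])).map
              (fun p => (p.1 + 1, p.2 + 1)) := by
          rw [show rest.map (· + 1) ++ [((L.length : Nat) : Int) + 1] =
              (rest ++ [((L.length : Nat) : Int)]).map (· + 1) by simp,
            show ((((k : Int) + 1) :: rest.map (· + 1))) =
              (((k : Int)) :: rest).map (· + 1) by simp,
            List.zip_map]
          exact List.map_congr_left (fun p _ => by cases p; rfl)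
        rw [hz, pvFlat_shift x L _ hnn, ih,
          pvPair_head x L k (le_of_lt hklt), htake, hseg,
          pvSeg_split L (pvTitleExpr x, [])]
        simp
    · simp only [hh, Bool.false_eq_true, if_false, List.nil_append]
      have hseg : pvSeg (x :: L) none = pvSeg L none := by simp [pvSeg, hh]
      have htail : ((pvHIdx L).map (· + 1)).tail = ((pvHIdx L).tail).map (· + 1) := by
        cases hpv : pvHIdx L <;> simp
      rw [htail, hlen2,
        show ((pvHIdx L).tail).map (· + 1) ++ [((L.length : Nat) : Int) + 1] =
          ((pvHIdx L).tail ++ [((L.length : Nat) : Int)]).map (· + 1) by simp,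
        List.zip_map,
        show ((pvHIdx L).zip ((pvHIdx L).tail ++ [((L.length : Nat) : Int)])).map
            (Prod.map (· + 1) (· + 1)) =
          ((pvHIdx L).zip ((pvHIdx L).tail ++ [((L.length : Nat) : Int)])).map
            (fun p => (p.1 + 1, p.2 + 1)) from
          List.map_congr_left (fun p _ => by cases p; rfl),
        pvFlat_shift x L _ (pvZip_nonneg L), ih, hseg]

-- loop over pairs = flatMap
theorem pvB_fold (lines : List String) (ps : List (Int × Int)) :
    ps.foldl (fun acc p => acc ++ pvPair lines p) [] = ps.flatMap (pvPair lines) := by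
  simpa using PySem.List.foldl_append_eq_flatMap (l := ps) (g := pvPair lines) (acc := [])

-- ===== VERDICT (by name: the statement is the Claim_ definition above) =====
theorem pv_tips_eq (L : List String) :
    pvFlush (List.foldl pvAStep ([], none, []) L) =
      ((pvHIdx (L.filterMap pvBClean)).zip
        ((pvHIdx (L.filterMap pvBClean)).tail ++ [((L.filterMap pvBClean).length : Int)])).flatMap
        (pvPair (L.filterMap pvBClean)) := by
  rw [pvA_filterMap, pvB_main]
  rw [show (([], none, []) : List (List (String × String)) × Option String × List String) =
      (([] : List (List (String × String))), (none : Option String), ([] : List String)) from rfl]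
  rw [pvA_seg_none]
  simp

theorem parse_tips_spec : Claim_equal_parse_tips := by
  intro text _
  unfold Spec_parse_tips
  show parse_tips text = parse_tips_alt text
  unfold parse_tips parse_tips_alt
  simp only [PySem.List.slice_from_one, pvB_fold]
  show (let lines := (PySem.Str.split? (PySem.Str.strip text) "\n").getD [];
    let st := lines.foldl pvAStep ([], none, []);
    let tips := pvFlush st;
    let tips := if tips.isEmpty then [[("title", "AI Advice"), ("advice", text)]] else tips;
    PySem.List.slice tips none (some 3)) =
    (let lines := ((PySem.Str.split? (PySem.Str.strip text) "\n").getD []).filterMap pvBClean;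
    let idxs := pvHIdx lines;
    let pairs := idxs.zip (idxs.tail ++ [(lines.length : Int)]);
    let tips := pairs.flatMap (pvPair lines);
    if tips.isEmpty then [[("title", "AI Advice"), ("advice", text)]]
    else PySem.List.slice tips none (some 3))
  simp only [pv_tips_eq]
  set tips := ((pvHIdx (((PySem.Str.split? (PySem.Str.strip text) "\n").getD []).filterMap pvBClean)).zip
      ((pvHIdx (((PySem.Str.split? (PySem.Str.strip text) "\n").getD []).filterMap pvBClean)).tail ++
        [((((PySem.Str.split? (PySem.Str.strip text) "\n").getD []).filterMap pvBClean).length : Int)])).flatMap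
      (pvPair (((PySem.Str.split? (PySem.Str.strip text) "\n").getD []).filterMap pvBClean)) with htips
  by_cases h : tips.isEmpty
  · simp only [h, if_true]
    rfl
  · simp only [h, Bool.false_eq_true, if_false]
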